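-- pv_equiv track=rewrite | github.com/DHHuji/journals-keyword-searching | collect_bibtex_citations.py | collect_all_fields
-- ===== SOURCE A (Python) =====
-- STANDARD_FIELDS = [
--     'entry_type', 'citation_key', 'title', 'author', 'year',
--     'journal', 'volume', 'number', 'pages', 'publisher',
--     'issn', 'url', 'urldate'
-- ]
--
-- def collect_all_fields(all_entries):
--     """Collect all unique field names from all entries."""
--     fields = set()
--     for entry in all_entries:
--         fields.update(entry.keys())
--
--     ordered_fields = []
--     for field in STANDARD_FIELDS:
--         if field in fields:
--             ordered_fields.append(field)
--             fields.discard(field)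
--
--     ordered_fields.extend(sorted(fields))
--
--     return ordered_fields
-- ===== SOURCE B (Python) =====
-- STANDARD_FIELDS = [
--     'entry_type', 'citation_key', 'title', 'author', 'year',
--     'journal', 'volume', 'number', 'pages', 'publisher',
--     'issn', 'url', 'urldate'
-- ]
--
-- _RANK = {f: i for i, f in enumerate(STANDARD_FIELDS)}
--
-- def collect_all_fields(all_entries):
--     """Collect all unique field names from all entries."""
--     fields = {f for entry in all_entries for f in entry.keys()}
--     return sorted(fields, key=lambda f: (_RANK.get(f, len(STANDARD_FIELDS)), f))
-- ===== Notes on version B (the rewrite author's own statement) =====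
-- stated objective: simpler
-- what changed: Replaces the partition loop over STANDARD_FIELDS (with append+discard) followed by sorting the leftover set by one single sorted() call on the whole field set under a composite key (rank-in-STANDARD_FIELDS or len(STANDARD_FIELDS), then the name).
import Mathlib
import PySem

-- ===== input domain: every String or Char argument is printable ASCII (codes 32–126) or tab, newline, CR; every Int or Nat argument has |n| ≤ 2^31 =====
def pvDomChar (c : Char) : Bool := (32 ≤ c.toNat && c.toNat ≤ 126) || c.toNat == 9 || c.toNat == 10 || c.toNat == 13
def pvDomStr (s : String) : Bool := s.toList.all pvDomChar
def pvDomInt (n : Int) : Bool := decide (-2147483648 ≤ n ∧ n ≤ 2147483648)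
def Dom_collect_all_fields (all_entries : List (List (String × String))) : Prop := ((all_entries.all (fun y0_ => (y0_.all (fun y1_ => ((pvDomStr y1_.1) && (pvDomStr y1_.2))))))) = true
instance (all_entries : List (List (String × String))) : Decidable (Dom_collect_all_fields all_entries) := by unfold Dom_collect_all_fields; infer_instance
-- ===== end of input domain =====

-- B replaces A's partition loop (append + discard over STANDARD_FIELDS, then sorting the leftover
-- set) by one sorted() call on the whole field set under the composite key (rank, name): simpler.

def STANDARD_FIELDS : List String :=
  ["entry_type", "citation_key", "title", "author", "year",
   "journal", "volume", "number", "pages", "publisher",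
   "issn", "url", "urldate"]

-- ===== PORT A =====
def collect_all_fields (all_entries : List (List (String × String))) : List String :=
  -- fields = set(); for entry in all_entries: fields.update(entry.keys())
  let fields : PySem.Set String :=
    all_entries.foldl (fun s entry => PySem.Set.update s (PySem.Dict.keys ⟨entry⟩)) PySem.Set.empty
  -- ordered_fields = []; for field in STANDARD_FIELDS: if field in fields: append; discard
  let st : List String × PySem.Set String :=
    STANDARD_FIELDS.foldl
      (fun st field =>
        if PySem.Set.contains st.2 field then (st.1 ++ [field], PySem.Set.discard st.2 field)
        else st)
      ([], fields)
  -- ordered_fields.extend(sorted(fields))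
  st.1 ++ PySem.List.sorted st.2 (fun x => x)

-- ===== PORT B =====
-- _RANK = {f: i for i, f in enumerate(STANDARD_FIELDS)}
def RANK : PySem.Dict String Int :=
  (PySem.List.enumerate STANDARD_FIELDS).foldl (fun d p => PySem.Dict.insert d p.2 p.1) ⟨[]⟩

def collect_all_fields_alt (all_entries : List (List (String × String))) : List String :=
  -- fields = {f for entry in all_entries for f in entry.keys()}
  let fields : PySem.Set String :=
    PySem.Set.ofList (all_entries.flatMap (fun entry => PySem.Dict.keys ⟨entry⟩))
  -- sorted(fields, key=lambda f: (_RANK.get(f, len(STANDARD_FIELDS)), f))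
  PySem.List.sorted2 fields
    (fun f => PySem.Dict.getD RANK f (STANDARD_FIELDS.length : Int))
    (fun f => f)

-- ===== PRECONDITION & SPEC =====
def Spec_collect_all_fields (all_entries : List (List (String × String))) (out : List String) : Prop := out = collect_all_fields_alt all_entries
instance (all_entries : List (List (String × String))) (out : List String) : Decidable (Spec_collect_all_fields all_entries out) := by unfold Spec_collect_all_fields; infer_instance

-- ===== CLAIM (what is proved, stated in full; the proofs are below) =====
def Claim_equal_collect_all_fields : Prop := ∀ (all_entries : List (List (String × String))), Dom_collect_all_fields all_entries → Spec_collect_all_fields all_entries (collect_all_fields all_entries)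

-- ===== LEMMAS AND PROOFS =====

-- the composite-key strict "before" relation used by B's sort
def pvLt (a b : String) : Bool :=
  decide (PySem.Dict.getD RANK a (STANDARD_FIELDS.length : Int) < PySem.Dict.getD RANK b (STANDARD_FIELDS.length : Int)) ||
  (!decide (PySem.Dict.getD RANK b (STANDARD_FIELDS.length : Int) < PySem.Dict.getD RANK a (STANDARD_FIELDS.length : Int)) &&
    decide (a < b))

theorem pvLt_trans (a b c : String) (h1 : pvLt a b = true) (h2 : pvLt b c = true) : pvLt a c = true := by
  simp only [pvLt, Bool.or_eq_true, Bool.and_eq_true, Bool.not_eq_true', decide_eq_true_eq,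
    decide_eq_false_iff_not, not_lt] at *
  rcases h1 with h1 | ⟨h1, h1'⟩ <;> rcases h2 with h2 | ⟨h2, h2'⟩
  · exact Or.inl (h1.trans h2)
  · exact Or.inl (lt_of_lt_of_le h1 h2)
  · exact Or.inl (lt_of_le_of_lt h1 h2)
  · exact Or.inr ⟨le_trans h1 h2, h1'.trans h2'⟩

theorem pvLt_asymm (a b : String) (h1 : pvLt a b = true) (h2 : pvLt b a = true) : False := by
  simp only [pvLt, Bool.or_eq_true, Bool.and_eq_true, Bool.not_eq_true', decide_eq_true_eq,
    decide_eq_false_iff_not, not_lt] at *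
  rcases h1 with h1 | ⟨h1, h1'⟩ <;> rcases h2 with h2 | ⟨h2, h2'⟩
  · exact absurd h2 (not_lt_of_gt h1)
  · exact absurd h1 (not_lt_of_ge h2)
  · exact absurd h2 (not_lt_of_ge h1)
  · exact absurd h2' (not_lt_of_gt h1')

theorem pvLt_total (a b : String) (h : a ≠ b) : pvLt a b = true ∨ pvLt b a = true := by
  simp only [pvLt, Bool.or_eq_true, Bool.and_eq_true, Bool.not_eq_true', decide_eq_true_eq,
    decide_eq_false_iff_not, not_lt]
  rcases lt_trichotomy (PySem.Dict.getD RANK a (STANDARD_FIELDS.length : Int))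
      (PySem.Dict.getD RANK b (STANDARD_FIELDS.length : Int)) with hk | hk | hk
  · exact Or.inl (Or.inl hk)
  · rcases lt_or_gt_of_ne h with hs | hs
    · exact Or.inl (Or.inr ⟨le_of_eq hk, hs⟩)
    · exact Or.inr (Or.inr ⟨le_of_eq hk.symm, hs⟩)
  · exact Or.inr (Or.inl hk)

-- insertion into a pvLt-pairwise list keeps it pairwise
theorem pairwise_insertBy (x : String) (l : List String)
    (htot : ∀ y ∈ l, pvLt x y = true ∨ pvLt y x = true)
    (h : l.Pairwise (fun a b => pvLt a b = true)) :
    (PySem.List.insertBy pvLt x l).Pairwise (fun a b => pvLt a b = true) := by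
  induction l with
  | nil => simp [PySem.List.insertBy]
  | cons y ys ih =>
    rw [List.pairwise_cons] at h
    by_cases hxy : pvLt x y = true
    · simp only [PySem.List.insertBy, hxy, if_true]
      refine List.Pairwise.cons ?_ (List.Pairwise.cons h.1 h.2)
      intro z hz
      rcases List.mem_cons.mp hz with rfl | hz
      · exact hxy
      · exact pvLt_trans x y z hxy (h.1 z hz)
    · simp only [PySem.List.insertBy, hxy]
      refine List.Pairwise.cons ?_ (ih (fun z hz => htot z (List.mem_cons_of_mem _ hz)) h.2)
      intro z hz
      rcases (PySem.List.mem_insertBy pvLt x z ys).mp hz with rfl | hz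
      · rcases htot y List.mem_cons_self with hc | hc
        · exact absurd hc hxy
        · exact hc
      · exact h.1 z hz

theorem pairwise_foldl_insertBy (xs : List String) :
    ∀ (acc : List String),
    (∀ x ∈ xs, ∀ y ∈ acc, pvLt x y = true ∨ pvLt y x = true) →
    (∀ a ∈ xs, ∀ b ∈ xs, a ≠ b → pvLt a b = true ∨ pvLt b a = true) →
    xs.Nodup →
    acc.Pairwise (fun a b => pvLt a b = true) →
    (xs.foldl (fun acc x => PySem.List.insertBy pvLt x acc) acc).Pairwise (fun a b => pvLt a b = true) := by
  induction xs with
  | nil => intro acc _ _ _ hp; simpa using hp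
  | cons x rest ih =>
    intro acc htot1 htot2 hnd hp
    rw [List.nodup_cons] at hnd
    simp only [List.foldl_cons]
    refine ih (PySem.List.insertBy pvLt x acc) ?_ ?_ hnd.2 ?_
    · intro x' hx' y hy
      rcases (PySem.List.mem_insertBy pvLt x y acc).mp hy with rfl | hy
      · refine htot2 x' (List.mem_cons_of_mem _ hx') y List.mem_cons_self ?_
        intro hEq; exact hnd.1 (hEq ▸ hx')
      · exact htot1 x' (List.mem_cons_of_mem _ hx') y hy
    · intro a ha b hb hab
      exact htot2 a (List.mem_cons_of_mem _ ha) b (List.mem_cons_of_mem _ hb) hab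
    · exact pairwise_insertBy x acc (fun y hy => htot1 x List.mem_cons_self y hy) hp

-- B's sort is pairwise pvLt
theorem sorted2_pairwise (xs : List String) (hnd : xs.Nodup) :
    (PySem.List.sorted2 xs
      (fun f => PySem.Dict.getD RANK f (STANDARD_FIELDS.length : Int))
      (fun f => f)).Pairwise (fun a b => pvLt a b = true) := by
  have : PySem.List.sorted2 xs
      (fun f => PySem.Dict.getD RANK f (STANDARD_FIELDS.length : Int))
      (fun f => f)
      = xs.foldl (fun acc x => PySem.List.insertBy pvLt x acc) [] := rfl
  rw [this]
  exact pairwise_foldl_insertBy xs [] (by simp)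
    (fun a _ b _ hab => pvLt_total a b hab) hnd List.Pairwise.nil

-- rank of a non-standard field is 13
theorem rk_of_not_mem (f : String) (h : f ∉ STANDARD_FIELDS) :
    PySem.Dict.getD RANK f (STANDARD_FIELDS.length : Int) = 13 := by
  simp only [STANDARD_FIELDS, List.mem_cons, List.not_mem_nil, or_false, not_or] at h
  obtain ⟨h1, h2, h3, h4, h5, h6, h7, h8, h9, h10, h11, h12, h13⟩ := h
  have hR : RANK = ⟨[("entry_type", 0), ("citation_key", 1), ("title", 2), ("author", 3),
      ("year", 4), ("journal", 5), ("volume", 6), ("number", 7), ("pages", 8),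
      ("publisher", 9), ("issn", 10), ("url", 11), ("urldate", 12)]⟩ := by decide
  have key : ∀ (g : String), ¬f = g → (g == f) = false :=
    fun g hg => beq_eq_false_iff_ne.mpr (fun h => hg h.symm)
  simp [hR, PySem.Dict.getD, PySem.Dict.get?, List.find?,
    key _ h1, key _ h2, key _ h3, key _ h4, key _ h5, key _ h6, key _ h7,
    key _ h8, key _ h9, key _ h10, key _ h11, key _ h12, key _ h13, STANDARD_FIELDS]

-- for two non-standard fields pvLt is just string <
theorem pvLt_of_not_mem (a b : String) (ha : a ∉ STANDARD_FIELDS) (hb : b ∉ STANDARD_FIELDS)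
    (hab : a < b) : pvLt a b = true := by
  simp only [pvLt, rk_of_not_mem a ha, rk_of_not_mem b hb, Bool.or_eq_true, Bool.and_eq_true,
    Bool.not_eq_true', decide_eq_true_eq, decide_eq_false_iff_not, not_lt]
  exact Or.inr ⟨le_refl _, hab⟩

-- a standard field strictly precedes any non-standard field
theorem pvLt_std_nonstd (a b : String) (ha : a ∈ STANDARD_FIELDS) (hb : b ∉ STANDARD_FIELDS) :
    pvLt a b = true := by
  have hrb : PySem.Dict.getD RANK b (STANDARD_FIELDS.length : Int) = 13 := rk_of_not_mem b hb
  have hra : PySem.Dict.getD RANK a (STANDARD_FIELDS.length : Int) < 13 := by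
    fin_cases ha <;> decide
  simp only [pvLt, hrb, Bool.or_eq_true, decide_eq_true_eq]
  exact Or.inl hra

-- STANDARD_FIELDS itself is strictly increasing under pvLt
theorem std_pairwise : STANDARD_FIELDS.Pairwise (fun a b => pvLt a b = true) := by decide

theorem std_nodup : STANDARD_FIELDS.Nodup := by decide

-- A's set-building loop builds set(flatMap keys)
theorem set_build (all_entries : List (List (String × String))) :
    all_entries.foldl (fun s entry => PySem.Set.update s (PySem.Dict.keys ⟨entry⟩)) PySem.Set.empty
      = PySem.Set.ofList (all_entries.flatMap (fun entry => PySem.Dict.keys ⟨entry⟩)) := by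
  have gen : ∀ (es : List (List (String × String))) (s : PySem.Set String),
      es.foldl (fun s entry => PySem.Set.update s (PySem.Dict.keys ⟨entry⟩)) s
        = PySem.Set.update s (es.flatMap (fun entry => PySem.Dict.keys ⟨entry⟩)) := by
    intro es
    induction es with
    | nil => intro s; simp [PySem.Set.update]
    | cons e rest ih =>
      intro s
      simp only [List.foldl_cons, List.flatMap_cons, ih, PySem.Set.update_append]
  rw [gen]
  exact PySem.Set.update_nil_left _

-- characterisation of A's partition loop
theorem std_loop (sf : List String) (hnd : sf.Nodup) :
    ∀ (of : List String) (fs : PySem.Set String),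
    sf.foldl
      (fun st field =>
        if PySem.Set.contains st.2 field then (st.1 ++ [field], PySem.Set.discard st.2 field)
        else st)
      (of, fs)
      = (of ++ sf.filter (fun f => PySem.Set.contains fs f),
         fs.filter (fun x => !sf.contains x)) := by
  induction sf with
  | nil => intro of fs; simp
  | cons f rest ih =>
    rw [List.nodup_cons] at hnd
    intro of fs
    by_cases hc : PySem.Set.contains fs f = true
    · rw [List.foldl_cons, if_pos hc, ih hnd.2, Prod.mk.injEq]
      constructor
      · have hfc : List.filter (fun g => PySem.Set.contains (PySem.Set.discard fs f) g) rest
            = List.filter (fun g => PySem.Set.contains fs g) rest := by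
          refine List.filter_congr ?_
          intro g hg
          have hgf : g ≠ f := fun hEq => hnd.1 (hEq ▸ hg)
          simp [PySem.Set.contains, PySem.Set.discard, List.contains_eq_mem,
            List.mem_filter, hgf]
        have hf : f ∈ fs := by
          simpa [PySem.Set.contains, List.contains_eq_mem] using hc
        rw [hfc, List.filter_cons]
        simp [PySem.Set.contains, List.contains_eq_mem, hf]
      · simp only [PySem.Set.discard, List.filter_filter]
        refine List.filter_congr ?_
        intro x _
        simp only [List.contains_eq_mem, List.mem_cons]
        by_cases hxf : x = f <;> simp [hxf]
    · rw [List.foldl_cons, if_neg hc, ih hnd.2, Prod.mk.injEq]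
      constructor
      · have hf : f ∉ fs := fun hf =>
          hc (by simp [PySem.Set.contains, List.contains_eq_mem, hf])
        rw [List.filter_cons]
        simp [PySem.Set.contains, List.contains_eq_mem, hf]
      · refine List.filter_congr ?_
        intro x hx
        have hxf : x ≠ f := by
          intro hEq
          exact hc (by simpa [PySem.Set.contains, List.contains_eq_mem, hEq] using hx)
        simp [List.contains_eq_mem, hxf]

-- ===== VERDICT (by name: the statement is the Claim_ definition above) =====
theorem collect_all_fields_spec : Claim_equal_collect_all_fields := by
  intro all_entries _
  unfold Spec_collect_all_fields
  simp only [collect_all_fields, collect_all_fields_alt]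
  set S : PySem.Set String :=
    PySem.Set.ofList (all_entries.flatMap (fun entry => PySem.Dict.keys ⟨entry⟩)) with hS
  have hSnd : S.Nodup := PySem.Set.nodup_ofList _
  rw [set_build, std_loop STANDARD_FIELDS std_nodup]
  -- A's value:
  set ys : List String :=
    STANDARD_FIELDS.filter (fun f => PySem.Set.contains S f) ++
      PySem.List.sorted (S.filter (fun x => !STANDARD_FIELDS.contains x)) (fun x => x) with hys
  show ys = _
  -- both sides are permutations of S and strictly pvLt-pairwise, hence equal
  have h1nd : (STANDARD_FIELDS.filter (fun f => PySem.Set.contains S f)).Nodup :=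
    std_nodup.filter _
  have hrestnd : (S.filter (fun x => !STANDARD_FIELDS.contains x)).Nodup := hSnd.filter _
  have hsortednd :
      (PySem.List.sorted (S.filter (fun x => !STANDARD_FIELDS.contains x)) (fun x => x)).Nodup :=
    (PySem.List.sorted_perm _ _ _).nodup_iff.mpr hrestnd
  -- permutation: ys.Perm S
  have hperm1 : (STANDARD_FIELDS.filter (fun f => PySem.Set.contains S f)).Perm
      (S.filter (fun x => STANDARD_FIELDS.contains x)) := by
    rw [List.perm_ext_iff_of_nodup h1nd (hSnd.filter _)]
    intro a
    simp [List.mem_filter, List.contains_eq_mem, and_comm]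
  have hpermys : ys.Perm S := by
    refine (hperm1.append (PySem.List.sorted_perm _ _ _)).trans ?_
    exact List.filter_append_perm (fun x => STANDARD_FIELDS.contains x) S
  -- pairwise pvLt of ys
  have hmem1 : ∀ a ∈ STANDARD_FIELDS.filter (fun f => PySem.Set.contains S f),
      a ∈ STANDARD_FIELDS := fun a ha => (List.mem_filter.mp ha).1
  have hmem2 : ∀ b ∈ PySem.List.sorted (S.filter (fun x => !STANDARD_FIELDS.contains x))
      (fun x => x), b ∉ STANDARD_FIELDS := by
    intro b hb
    have := (PySem.List.sorted_perm _ _ _).mem_iff.mp hb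
    have := (List.mem_filter.mp this).2
    simpa [List.contains_eq_mem] using this
  have hpw : ys.Pairwise (fun a b => pvLt a b = true) := by
    rw [hys, List.pairwise_append]
    refine ⟨std_pairwise.sublist List.filter_sublist, ?_, ?_⟩
    · have hle : (PySem.List.sorted (S.filter (fun x => !STANDARD_FIELDS.contains x))
          (fun x => x)).Pairwise (fun a b => a ≤ b) := by
        have := PySem.List.sorted_pairwise (S.filter (fun x => !STANDARD_FIELDS.contains x))
          (fun x => x)
        simpa using this
      have hne : (PySem.List.sorted (S.filter (fun x => !STANDARD_FIELDS.contains x))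
          (fun x => x)).Pairwise (fun a b => a ≠ b) := hsortednd
      refine (hle.and hne).imp_of_mem ?_
      intro a b ha hb hab
      exact pvLt_of_not_mem a b (hmem2 a ha) (hmem2 b hb) (lt_of_le_of_ne hab.1 hab.2)
    · intro a ha b hb
      exact pvLt_std_nonstd a b (hmem1 a ha) (hmem2 b hb)
  -- the sorted2 side
  have hpw2 : (PySem.List.sorted2 S
      (fun f => PySem.Dict.getD RANK f (STANDARD_FIELDS.length : Int))
      (fun f => f)).Pairwise (fun a b => pvLt a b = true) := sorted2_pairwise S hSnd
  have hperm2 : ys.Perm (PySem.List.sorted2 S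
      (fun f => PySem.Dict.getD RANK f (STANDARD_FIELDS.length : Int)) (fun f => f)) :=
    hpermys.trans (PySem.List.sorted2_perm _ _ _ _).symm
  exact List.Perm.eq_of_pairwise
    (fun a b _ _ h1 h2 => absurd (pvLt_asymm a b h1 h2) not_false) hpw hpw2 hperm2
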